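-- pv_equiv track=rewrite | github.com/enrique-yoab/Cubo-Rubik | intelligent_analysis/smart_search_for_cruz.py | play_peso
-- ===== SOURCE A (Python) =====
-- def play_peso(posicion_jugada, categoria):
--     peso_jugada = []
--     #red = 0 , blue = 1 , white = 2 , green = 3 , yellow = 4 , orange = 5
--     #superior = 0, inferior = 1, primera columna = 2, ultima columa = 3
--     for i in range(len(posicion_jugada)):
--         #renglones superior e inferior
--         if (categoria == 0 or categoria == 5 or categoria == 4) and (posicion_jugada[i] == 0 or posicion_jugada[i] == 1):
--             peso_jugada.append(2) #dos movimientos para acomodarlo en la cruz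
--         #columna primera y ultima
--         elif (categoria == 0 or categoria == 5) and (posicion_jugada[i] == 2 or posicion_jugada[i] == 3):
--             peso_jugada.append(1) #1 movimiento para acomodarlo en la cruz
--         #renglones superiores
--         elif (categoria == 1 or categoria == 3) and (posicion_jugada[i] == 0 or posicion_jugada[i] == 1):
--             peso_jugada.append(1) #un movimiento para acomodarlo en la cruz
--         #columna primera y ultima
--         elif (categoria == 1 or categoria == 3 or categoria == 4) and (posicion_jugada[i] == 2 or posicion_jugada[i] == 3):
--             peso_jugada.append(2) #2 movimientos para acomodarlo en la cruz
--
--     return peso_jugada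
-- ===== SOURCE B (Python) =====
-- def _w(c, p):
--     # arithmetic weight: rows (p//2 == 0) vs columns (p//2 == 1)
--     if not (0 <= p <= 3):
--         return None
--     if c == 4:
--         return 2
--     if c in (0, 5):
--         return 2 - p // 2
--     if c in (1, 3):
--         return 1 + p // 2
--     return None
--
--
-- def play_peso(posicion_jugada, categoria):
--     # divide and conquer over the list (depth O(log n))
--     if len(posicion_jugada) <= 1:
--         if not posicion_jugada:
--             return []
--         w = _w(categoria, posicion_jugada[0])
--         return [] if w is None else [w]
--     m = len(posicion_jugada) // 2
--     return play_peso(posicion_jugada[:m], categoria) + play_peso(posicion_jugada[m:], categoria)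
-- ===== Notes on version B (the rewrite author's own statement) =====
-- stated objective: alternative
-- what changed: Replaces the single loop with the nested if/elif case table by a divide-and-conquer recursion over list halves whose leaf computes the weight by an arithmetic formula (2 - p//2 for categories 0/5, 1 + p//2 for 1/3, constant 2 for 4).
import Mathlib
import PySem

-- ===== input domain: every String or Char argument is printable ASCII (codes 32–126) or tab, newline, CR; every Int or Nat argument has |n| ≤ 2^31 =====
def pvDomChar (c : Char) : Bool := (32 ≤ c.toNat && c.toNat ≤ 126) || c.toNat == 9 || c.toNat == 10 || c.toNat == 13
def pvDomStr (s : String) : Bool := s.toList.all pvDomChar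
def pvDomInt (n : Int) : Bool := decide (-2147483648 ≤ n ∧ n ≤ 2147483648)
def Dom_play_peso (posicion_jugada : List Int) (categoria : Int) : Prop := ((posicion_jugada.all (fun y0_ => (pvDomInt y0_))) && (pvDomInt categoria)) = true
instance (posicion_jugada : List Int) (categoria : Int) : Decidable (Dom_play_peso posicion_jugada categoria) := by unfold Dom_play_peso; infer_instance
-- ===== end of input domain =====

-- B replaces A's single loop with its if/elif case table by a divide-and-conquer recursion over
-- list halves whose leaf computes the weight by an arithmetic formula (objective: alternative).

-- ===== PORT A =====
def play_peso (posicion_jugada : List Int) (categoria : Int) : List Int :=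
  (PySem.List.pyRange 0 (PySem.List.len posicion_jugada) 1).foldl (fun peso_jugada i =>
    -- posicion_jugada[i]: i ∈ range(len(posicion_jugada)), always in range, so pyGetD is exact here
    if (categoria == 0 || categoria == 5 || categoria == 4) &&
       (PySem.List.pyGetD posicion_jugada i 0 == 0 || PySem.List.pyGetD posicion_jugada i 0 == 1) then
      peso_jugada ++ [2]
    else if (categoria == 0 || categoria == 5) &&
       (PySem.List.pyGetD posicion_jugada i 0 == 2 || PySem.List.pyGetD posicion_jugada i 0 == 3) then
      peso_jugada ++ [1]
    else if (categoria == 1 || categoria == 3) &&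
       (PySem.List.pyGetD posicion_jugada i 0 == 0 || PySem.List.pyGetD posicion_jugada i 0 == 1) then
      peso_jugada ++ [1]
    else if (categoria == 1 || categoria == 3 || categoria == 4) &&
       (PySem.List.pyGetD posicion_jugada i 0 == 2 || PySem.List.pyGetD posicion_jugada i 0 == 3) then
      peso_jugada ++ [2]
    else peso_jugada) []

-- ===== PORT B =====
-- Source B's helper _w: arithmetic weight formula, None outside the 0..3 position range
def pesoW (c p : Int) : Option Int :=
  if ¬(0 ≤ p ∧ p ≤ 3) then none
  else if c == 4 then some 2
  else if c == 0 || c == 5 then some (2 - PySem.Int.floordiv p 2)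
  else if c == 1 || c == 3 then some (1 + PySem.Int.floordiv p 2)
  else none

-- Source B's divide-and-conquer: split at len//2, recurse on both halves, concatenate
def play_peso_alt (posicion_jugada : List Int) (categoria : Int) : List Int :=
  if posicion_jugada.length ≤ 1 then
    match posicion_jugada with
    | [] => []
    | p :: _ => match pesoW categoria p with
                | none => []
                | some w => [w]
  else
    let m := posicion_jugada.length / 2
    play_peso_alt (posicion_jugada.take m) categoria ++
      play_peso_alt (posicion_jugada.drop m) categoria
termination_by posicion_jugada.length
decreasing_by
  · simp only [List.length_take]; omega
  · simp only [List.length_drop]; omega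

-- ===== PRECONDITION & SPEC =====
def Spec_play_peso (posicion_jugada : List Int) (categoria : Int) (out : List Int) : Prop := out = play_peso_alt posicion_jugada categoria
instance (posicion_jugada : List Int) (categoria : Int) (out : List Int) : Decidable (Spec_play_peso posicion_jugada categoria out) := by unfold Spec_play_peso; infer_instance

-- ===== CLAIM (what is proved, stated in full; the proofs are below) =====
def Claim_equal_play_peso : Prop := ∀ (posicion_jugada : List Int) (categoria : Int), Dom_play_peso posicion_jugada categoria → Spec_play_peso posicion_jugada categoria (play_peso posicion_jugada categoria)

-- ===== LEMMAS AND PROOFS =====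

-- A's if/elif chain computes exactly B's arithmetic weight
theorem chain_eq_pesoW (c p : Int) :
    (if (c == 0 || c == 5 || c == 4) && (p == 0 || p == 1) then some (2:Int)
     else if (c == 0 || c == 5) && (p == 2 || p == 3) then some 1
     else if (c == 1 || c == 3) && (p == 0 || p == 1) then some 1
     else if (c == 1 || c == 3 || c == 4) && (p == 2 || p == 3) then some 2
     else none) = pesoW c p := by
  by_cases hp : (p = 0 ∨ p = 1 ∨ p = 2 ∨ p = 3)
  · by_cases hc : (c = 0 ∨ c = 1 ∨ c = 3 ∨ c = 4 ∨ c = 5)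
    · rcases hc with rfl|rfl|rfl|rfl|rfl <;> rcases hp with rfl|rfl|rfl|rfl <;> decide
    · simp only [pesoW]
      split_ifs <;>
        first
          | rfl
          | (simp only [Bool.and_eq_true, Bool.or_eq_true, beq_iff_eq] at *; omega)
  · simp only [pesoW]
    split_ifs <;>
      first
        | rfl
        | (simp only [Bool.and_eq_true, Bool.or_eq_true, beq_iff_eq] at *; omega)

-- B's divide-and-conquer computes the filterMap of its leaf function
theorem alt_eq_filterMap (categoria : Int) :
    ∀ (pj : List Int), play_peso_alt pj categoria = pj.filterMap (pesoW categoria) := by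
  intro pj
  induction hn : pj.length using Nat.strong_induction_on generalizing pj with
  | _ n ih =>
    rw [play_peso_alt.eq_def]
    by_cases h : pj.length ≤ 1
    · simp only [h, if_true]
      match pj, h with
      | [], _ => simp
      | [p], _ => cases hw : pesoW categoria p <;> simp [hw]
    · simp only [h, if_false]
      rw [ih ((pj.take (pj.length / 2)).length) (by subst hn; simp; omega) _ rfl,
          ih ((pj.drop (pj.length / 2)).length) (by subst hn; simp; omega) _ rfl,
          ← List.filterMap_append, List.take_append_drop]

-- appending each present lookup result is filterMap
theorem foldl_append_toList (g : Int → Option Int) :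
    ∀ (l acc : List Int),
      l.foldl (fun a x => a ++ (g x).toList) acc = acc ++ l.filterMap g := by
  intro l
  induction l with
  | nil => simp
  | cons x xs ih =>
    intro acc
    cases h : g x <;> simp [List.foldl_cons, h, ih]

-- ===== VERDICT (by name: the statement is the Claim_ definition above) =====
theorem play_peso_spec : Claim_equal_play_peso := by
  intro pj categoria _
  unfold Spec_play_peso play_peso
  rw [alt_eq_filterMap]
  rw [PySem.List.foldl_pyRange_pyGetD (xs := pj) (d := 0) (a := 0) (init := ([] : List Int))
    (f := fun acc x =>
      if (categoria == 0 || categoria == 5 || categoria == 4) && (x == 0 || x == 1) then acc ++ [(2:Int)]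
      else if (categoria == 0 || categoria == 5) && (x == 2 || x == 3) then acc ++ [1]
      else if (categoria == 1 || categoria == 3) && (x == 0 || x == 1) then acc ++ [1]
      else if (categoria == 1 || categoria == 3 || categoria == 4) && (x == 2 || x == 3) then acc ++ [2]
      else acc) (by norm_num)]
  simp only [Int.toNat_zero, List.drop_zero]
  have hstep : ∀ (acc : List Int) (x : Int),
      (if (categoria == 0 || categoria == 5 || categoria == 4) && (x == 0 || x == 1) then acc ++ [(2:Int)]
       else if (categoria == 0 || categoria == 5) && (x == 2 || x == 3) then acc ++ [1]
       else if (categoria == 1 || categoria == 3) && (x == 0 || x == 1) then acc ++ [1]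
       else if (categoria == 1 || categoria == 3 || categoria == 4) && (x == 2 || x == 3) then acc ++ [2]
       else acc) = acc ++ (pesoW categoria x).toList := by
    intro acc x
    rw [← chain_eq_pesoW categoria x]
    split_ifs <;> simp
  simp only [hstep]
  rw [foldl_append_toList]
  simp
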